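-- pv_equiv track=rewrite | github.com/PowerBarcoder/PowerBarcoder | main/qcModule/validator.py | longest_atcg_sequence
-- ===== SOURCE A (Python) =====
-- def longest_atcg_sequence(sequence: str):
--     """
--     Returns the length of the longest consecutive ATCG subsequence in the given sequence.
--
--     :param sequence: Input sequence.
--     :return: Length of the longest consecutive ATCG subsequence.
--     """
--     longest_length = 0
--     current_length = 0
--     for char in sequence:
--         if char in ['A', 'T', 'C', 'G']:
--             current_length += 1
--         else:
--             current_length = 0
--         if current_length > longest_length:
--             longest_length = current_length
--     return longest_length
-- ===== SOURCE B (Python) =====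
-- from itertools import groupby
--
--
-- def longest_atcg_sequence(sequence: str):
--     """
--     Returns the length of the longest consecutive ATCG subsequence in the given sequence.
--
--     :param sequence: Input sequence.
--     :return: Length of the longest consecutive ATCG subsequence.
--     """
--     return max(
--         (sum(1 for _ in grp)
--          for key, grp in groupby(sequence, key=lambda c: c in ('A', 'T', 'C', 'G'))
--          if key),
--         default=0,
--     )
-- ===== Notes on version B (the rewrite author's own statement) =====
-- stated objective: idiomatic
-- what changed: Replaces the hand-maintained current/longest counter loop with itertools.groupby: the input is partitioned into maximal same-class runs and the answer is the max length of the ATCG runs (default 0).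
import Mathlib
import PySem

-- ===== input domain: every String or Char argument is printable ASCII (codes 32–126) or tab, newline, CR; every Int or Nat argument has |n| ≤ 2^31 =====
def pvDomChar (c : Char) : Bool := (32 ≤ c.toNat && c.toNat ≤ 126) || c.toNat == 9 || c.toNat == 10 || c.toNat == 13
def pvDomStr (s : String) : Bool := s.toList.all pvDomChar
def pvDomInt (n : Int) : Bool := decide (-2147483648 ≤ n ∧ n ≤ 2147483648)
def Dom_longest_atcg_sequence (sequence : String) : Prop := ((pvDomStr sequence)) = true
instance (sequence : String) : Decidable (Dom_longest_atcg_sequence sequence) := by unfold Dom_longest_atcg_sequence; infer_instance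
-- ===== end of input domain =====

-- B replaces A's running current/longest counters with a groupby-into-maximal-runs
-- decomposition (max run length over the ATCG runs, default 0); idiomatic, same cost.


-- ===== PORT A =====
-- for char in sequence: update current_length, then longest_length
def longest_atcg_sequence (sequence : String) : Int :=
  (sequence.toList.foldl
    (fun (st : Int × Int) char =>
      let current := if (['A', 'T', 'C', 'G'] : List Char).contains char then st.2 + 1 else 0
      let longest := if current > st.1 then current else st.1
      (longest, current))
    (0, 0)).1

-- ===== PORT B =====
-- key = lambda c: c in ('A','T','C','G')
def pvIsATCG (c : Char) : Bool := c == 'A' || c == 'T' || c == 'C' || c == 'G'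

-- itertools.groupby: maximal runs of equal key, in order (built by recursion on the list)
def pvGroupby : List Char → List (Bool × List Char)
  | [] => []
  | c :: rest =>
    match pvGroupby rest with
    | [] => [(pvIsATCG c, [c])]
    | (k, g) :: t =>
      if pvIsATCG c = k then (k, c :: g) :: t else (pvIsATCG c, [c]) :: (k, g) :: t

-- max((sum(1 for _ in grp) for key, grp in groupby(...) if key), default=0)
def longest_atcg_sequence_alt (sequence : String) : Int :=
  (PySem.List.max?
      ((pvGroupby sequence.toList).filterMap
        (fun kg => if kg.1 then some ((kg.2.length : Int)) else none))
      (fun y => y)).getD 0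

-- ===== PRECONDITION & SPEC =====
def Spec_longest_atcg_sequence (sequence : String) (out : Int) : Prop := out = longest_atcg_sequence_alt sequence
instance (sequence : String) (out : Int) : Decidable (Spec_longest_atcg_sequence sequence out) := by unfold Spec_longest_atcg_sequence; infer_instance

-- ===== CLAIM (what is proved, stated in full; the proofs are below) =====
def Claim_equal_longest_atcg_sequence : Prop := ∀ (sequence : String), Dom_longest_atcg_sequence sequence → Spec_longest_atcg_sequence sequence (longest_atcg_sequence sequence)

-- ===== LEMMAS AND PROOFS =====

-- max of the running counter over the traversal, given incoming run length c
def pvRunmax : List Char → Int → Int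
  | [], c => c
  | ch :: rest, c => if pvIsATCG ch then pvRunmax rest (c + 1) else max c (pvRunmax rest 0)

-- the same quantity read off a group list
def pvAuxB : List (Bool × List Char) → Int → Int
  | [], c => c
  | (true, g) :: t, c => pvAuxB t (c + g.length)
  | (false, _) :: t, c => max c (pvAuxB t 0)

-- max length of the true groups
def pvMl : List (Bool × List Char) → Int
  | [] => 0
  | (true, g) :: t => max (g.length : Int) (pvMl t)
  | (false, _) :: t => pvMl t

-- adjacent groups have different keys
def pvAltKeys : List (Bool × List Char) → Prop
  | [] => True
  | [_] => True
  | x :: y :: t => x.1 ≠ y.1 ∧ pvAltKeys (y :: t)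

def pvHeadTrue : List (Bool × List Char) → Bool
  | (true, _) :: _ => true
  | _ => false

theorem pvRunmax_ge : ∀ (cs : List Char) (c : Int), c ≤ pvRunmax cs c := by
  intro cs
  induction cs with
  | nil => intro c; simp [pvRunmax]
  | cons ch rest ih =>
    intro c
    simp only [pvRunmax]
    split
    · exact le_trans (by omega) (ih (c + 1))
    · exact le_max_left _ _

theorem pvFold_eq : ∀ (cs : List Char) (L c : Int), 0 ≤ c → c ≤ L →
    (cs.foldl
      (fun (st : Int × Int) char =>
        let current := if (['A', 'T', 'C', 'G'] : List Char).contains char then st.2 + 1 else 0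
        let longest := if current > st.1 then current else st.1
        (longest, current))
      (L, c)).1 = max L (pvRunmax cs c) := by
  intro cs
  induction cs with
  | nil => intro L c h0 hL; simp [pvRunmax]; omega
  | cons ch rest ih =>
    intro L c h0 hL
    have hmem : (['A', 'T', 'C', 'G'] : List Char).contains ch = pvIsATCG ch := by
      simp [pvIsATCG, Bool.or_assoc, Bool.beq_eq_decide_eq]
    simp only [List.foldl_cons, hmem, pvRunmax]
    by_cases hk : pvIsATCG ch = true
    · simp only [hk, if_true]
      rw [ih _ _ (by omega) (by omega)]
      have := pvRunmax_ge rest (c + 1)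
      omega
    · simp only [hk, if_false, Bool.false_eq_true]
      rw [ih _ _ (by omega) (by omega)]
      have := pvRunmax_ge rest 0
      omega

theorem pvAuxB_ge : ∀ (t : List (Bool × List Char)) (c : Int), c ≤ pvAuxB t c := by
  intro t
  induction t with
  | nil => intro c; simp [pvAuxB]
  | cons x t ih =>
    intro c
    obtain ⟨k, g⟩ := x
    cases k with
    | true =>
      simp only [pvAuxB]
      have := ih (c + g.length)
      have : (0 : Int) ≤ g.length := Int.natCast_nonneg _
      have := ih (c + g.length)
      omega
    | false => simp only [pvAuxB]; exact le_max_left _ _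

theorem pvRunmax_groupby : ∀ (cs : List Char) (c : Int),
    pvRunmax cs c = pvAuxB (pvGroupby cs) c := by
  intro cs
  induction cs with
  | nil => intro c; simp [pvRunmax, pvGroupby, pvAuxB]
  | cons ch rest ih =>
    intro c
    simp only [pvRunmax, pvGroupby]
    cases hg : pvGroupby rest with
    | nil =>
      cases hk : pvIsATCG ch <;>
        simp [pvAuxB, ih, hg]
    | cons p t =>
      obtain ⟨k, g⟩ := p
      by_cases hkk : pvIsATCG ch = k
      · subst hkk
        cases hk : pvIsATCG ch with
        | true =>
          simp only [hk, if_true, pvAuxB, ih, hg]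
          have : (c + 1) + (g.length : Int) = c + ((g.length + 1 : Nat) : Int) := by
            push_cast; ring
          simp [List.length_cons, this]
        | false =>
          simp only [hk, Bool.false_eq_true, if_false, ite_true, ih, hg, pvAuxB]
          have := pvAuxB_ge t 0
          omega
      · cases hk : pvIsATCG ch with
        | true =>
          rw [hk] at hkk
          simp only [if_true, if_neg hkk, ih, hg, pvAuxB]
          norm_num
        | false =>
          rw [hk] at hkk
          simp only [Bool.false_eq_true, if_false, if_neg hkk, ih, hg, pvAuxB]

theorem pvAlt_cons {k : Bool} {g g' : List Char} {t : List (Bool × List Char)}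
    (h : pvAltKeys ((k, g) :: t)) : pvAltKeys ((k, g') :: t) := by
  cases t with
  | nil => trivial
  | cons y t => exact h

theorem pvAlt_tail {x : Bool × List Char} {t : List (Bool × List Char)}
    (h : pvAltKeys (x :: t)) : pvAltKeys t := by
  cases t with
  | nil => trivial
  | cons y t => exact h.2

theorem pvGroupby_alt : ∀ (cs : List Char), pvAltKeys (pvGroupby cs) := by
  intro cs
  induction cs with
  | nil => trivial
  | cons ch rest ih =>
    simp only [pvGroupby]
    cases hg : pvGroupby rest with
    | nil => trivial
    | cons p t =>
      obtain ⟨k, g⟩ := p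
      rw [hg] at ih
      by_cases hkk : pvIsATCG ch = k
      · simp only [if_pos hkk]
        subst hkk
        exact pvAlt_cons ih
      · simp only [if_neg hkk]
        exact ⟨hkk, ih⟩

theorem pvMl_nonneg : ∀ (gl : List (Bool × List Char)), 0 ≤ pvMl gl := by
  intro gl
  induction gl with
  | nil => simp [pvMl]
  | cons x t ih =>
    obtain ⟨k, g⟩ := x
    cases k with
    | true => simp only [pvMl]; positivity
    | false => simpa [pvMl] using ih

theorem pvAuxB_ml : ∀ (n : Nat) (gl : List (Bool × List Char)), gl.length ≤ n →
    pvAltKeys gl → ∀ (c : Int), 0 ≤ c → (pvHeadTrue gl = true → c = 0) →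
    pvAuxB gl c = max c (pvMl gl) := by
  intro n
  induction n with
  | zero =>
    intro gl hlen _ c hc _
    have : gl = [] := List.eq_nil_of_length_eq_zero (Nat.le_zero.mp hlen)
    subst this
    simp [pvAuxB, pvMl]; omega
  | succ n ih =>
    intro gl hlen halt c hc hhead
    cases gl with
    | nil => simp only [pvAuxB, pvMl]; omega
    | cons x t =>
      obtain ⟨k, g⟩ := x
      cases k with
      | false =>
        have ht := ih t (by simpa using Nat.lt_succ_iff.mp (by simpa using hlen))
          (pvAlt_tail halt) 0 le_rfl (fun _ => rfl)
        have hml := pvMl_nonneg t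
        simp only [pvAuxB, pvMl, ht]
        omega
      | true =>
        have hc0 : c = 0 := hhead rfl
        subst hc0
        have hlg : (0 : Int) ≤ g.length := Int.natCast_nonneg _
        cases t with
        | nil => simp [pvAuxB, pvMl]
        | cons y t' =>
          obtain ⟨k2, g2⟩ := y
          have hk2 : k2 = false := by
            have := halt.1
            cases k2
            · rfl
            · simp at this
          subst hk2
          have ht' := ih t' (by simp at hlen ⊢; omega)
            (pvAlt_tail (pvAlt_tail halt)) 0 le_rfl (fun _ => rfl)
          have hml := pvMl_nonneg t'
          simp only [pvAuxB, pvMl, ht', zero_add]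
          omega

theorem pvFoldl_max_shift : ∀ (l : List Int) (a : Int), 0 ≤ a →
    l.foldl max a = max a (l.foldl max 0) := by
  intro l
  induction l with
  | nil => intro a ha; simp; omega
  | cons x t ih =>
    intro a ha
    simp only [List.foldl_cons]
    rw [ih (max a x) (by omega), ih (max 0 x) (by omega)]
    omega

theorem pvMax_getD : ∀ (l : List Int), (∀ y ∈ l, 0 ≤ y) →
    (PySem.List.max? l (fun y => y)).getD 0 = l.foldl max 0 := by
  intro l hl
  cases l with
  | nil => rfl
  | cons x t =>
    rw [PySem.List.max?_id_cons]
    have hx : 0 ≤ x := hl x (List.mem_cons_self ..)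
    simp only [Option.getD_some, List.foldl_cons]
    rw [pvFoldl_max_shift t x hx, pvFoldl_max_shift t (max 0 x) (by omega)]
    omega

theorem pvFilterMap_ml : ∀ (gl : List (Bool × List Char)),
    ((gl.filterMap (fun kg => if kg.1 then some ((kg.2.length : Int)) else none)).foldl max 0)
      = pvMl gl := by
  intro gl
  induction gl with
  | nil => rfl
  | cons x t ih =>
    obtain ⟨k, g⟩ := x
    cases k with
    | false => simpa [List.filterMap_cons, pvMl] using ih
    | true =>
      have hlg : (0 : Int) ≤ g.length := Int.natCast_nonneg _
      have hml := pvMl_nonneg t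
      simp only [List.filterMap_cons, if_true, List.foldl_cons, pvMl]
      rw [pvFoldl_max_shift _ (max 0 (g.length : Int)) (by omega), ih]
      omega

-- ===== VERDICT (by name: the statement is the Claim_ definition above) =====
theorem longest_atcg_sequence_spec : Claim_equal_longest_atcg_sequence := by
  intro s _
  unfold Spec_longest_atcg_sequence longest_atcg_sequence longest_atcg_sequence_alt
  rw [pvFold_eq s.toList 0 0 le_rfl le_rfl, pvRunmax_groupby,
    pvAuxB_ml (pvGroupby s.toList).length (pvGroupby s.toList) le_rfl
      (pvGroupby_alt s.toList) 0 le_rfl (fun _ => rfl),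
    pvMax_getD _ (by
      intro y hy
      simp only [List.mem_filterMap] at hy
      obtain ⟨kg, _, hkg⟩ := hy
      split at hkg
      · cases hkg; exact Int.natCast_nonneg _
      · cases hkg),
    pvFilterMap_ml]
  have := pvMl_nonneg (pvGroupby s.toList)
  omega
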